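-- pv_equiv track=rewrite | github.com/daniel-reich/ubiquitous-fiesta | hM9eDtYLEX8GnuhFZ_9.py | random
-- ===== SOURCE A (Python) =====
-- def random(lst):
--   B=[]
--   for i in range(65535):
--     if (i*lst[0]+1)%65535==lst[1]:
--       B.append(i)
--   if len(B)==1:
--     return (B[0]*lst[1]+1)%65535
--   else:
--     return None
-- ===== SOURCE B (Python) =====
-- def random(lst):
--     # Solve the congruence i*lst[0] + 1 ≡ lst[1] (mod 65535) directly instead of scanning.
--     m = 65535
--     a = lst[0] % m
--     b = lst[1]
--     if b < 0 or b >= m: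
--         return None
--     # extended Euclid on (a, m): returns g = gcd(a, m) and x with a*x ≡ g (mod m)
--     old_r, r = a, m
--     old_x, x = 1, 0
--     while r != 0:
--         q = old_r // r
--         old_r, r = r, old_r - q * r
--         old_x, x = x, old_x - q * x
--     if old_r != 1:
--         return None  # 0 or gcd-many solutions: never unique
--     i0 = (b - 1) * old_x % m
--     return (i0 * b + 1) % m
-- ===== Notes on version B (the rewrite author's own statement) =====
-- stated objective: faster
-- what changed: Instead of scanning all 65535 residues and collecting matches, B solves the linear congruence i*lst[0] ≡ lst[1]-1 (mod 65535) directly with a hand-written extended Euclid: a unique solution exists iff gcd(lst[0] mod 65535, 65535) = 1 and lst[1] is in [0,65535), and then i0 = (lst[1]-1)*inverse(a) mod 65535.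
import Mathlib
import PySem

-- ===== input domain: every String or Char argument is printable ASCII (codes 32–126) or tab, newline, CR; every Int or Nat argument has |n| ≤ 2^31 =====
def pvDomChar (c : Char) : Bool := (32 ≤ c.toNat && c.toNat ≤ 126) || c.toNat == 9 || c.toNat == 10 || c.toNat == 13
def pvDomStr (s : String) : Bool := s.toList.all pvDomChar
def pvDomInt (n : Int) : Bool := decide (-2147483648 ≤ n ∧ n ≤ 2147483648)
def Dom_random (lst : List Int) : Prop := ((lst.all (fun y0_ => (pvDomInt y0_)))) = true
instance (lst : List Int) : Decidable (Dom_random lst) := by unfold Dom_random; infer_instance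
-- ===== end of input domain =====

-- B replaces A's scan of all 65535 residues by solving the linear congruence directly
-- with a hand-written extended Euclid (simpler objective: direct algebra, no scan).

-- ===== PORT A =====
-- literal port of A: collect all i in range(65535) with (i*lst[0]+1)%65535 == lst[1]
def random (lst : List Int) : Option Int :=
  let B : List Int := (PySem.List.pyRange 0 65535 1).foldl
    (fun acc i =>
      if PySem.Int.mod (i * PySem.List.pyGetD lst 0 0 + 1) 65535 == PySem.List.pyGetD lst 1 0
      then acc ++ [i] else acc) []
  if B.length == 1 then
    some (PySem.Int.mod (PySem.List.pyGetD B 0 0 * PySem.List.pyGetD lst 1 0 + 1) 65535)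
  else none

-- ===== PORT B =====
-- extended Euclid loop of Source B: while r != 0: q = old_r//r; rotate (old_r,r) and (old_x,x)
def egcd (oldr r oldx x : Int) : Int × Int :=
  if h : r = 0 then (oldr, oldx)
  else egcd r (oldr - PySem.Int.floordiv oldr r * r) x (oldx - PySem.Int.floordiv oldr r * x)
termination_by r.natAbs
decreasing_by
  have h1 : oldr - PySem.Int.floordiv oldr r * r = PySem.Int.mod oldr r := by
    have := PySem.Int.floordiv_mul_add_mod oldr r; omega
  rw [h1]
  rcases lt_or_gt_of_ne h with hn | hp
  · have := PySem.Int.mod_neg_bounds oldr hn; omega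
  · have h2 := PySem.Int.mod_nonneg oldr hp
    have h3 := PySem.Int.mod_lt oldr hp
    omega

def random_alt (lst : List Int) : Option Int :=
  let m : Int := 65535
  let a := PySem.Int.mod (PySem.List.pyGetD lst 0 0) m
  let b := PySem.List.pyGetD lst 1 0
  if b < 0 ∨ m ≤ b then none
  else
    let gx := egcd a m 1 0
    if gx.1 ≠ 1 then none
    else
      let i0 := PySem.Int.mod ((b - 1) * gx.2) m
      some (PySem.Int.mod (i0 * b + 1) m)

-- ===== PRECONDITION & SPEC =====
-- Pre_ excludes lists of fewer than two elements, on which A raises IndexError.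
def Pre_random (lst : List Int) : Prop := 2 ≤ lst.length
instance (lst : List Int) : Decidable (Pre_random lst) := by unfold Pre_random; infer_instance
def pvWitness_random : List Int := [2, 3]
def Spec_random (lst : List Int) (out : Option Int) : Prop := out = random_alt lst
instance (lst : List Int) (out : Option Int) : Decidable (Spec_random lst out) := by unfold Spec_random; infer_instance

-- ===== CLAIM (what is proved, stated in full; the proofs are below) =====
def Claim_equal_random : Prop := ∀ (lst : List Int), Dom_random lst → Pre_random lst → Spec_random lst (random lst)

-- ===== LEMMAS AND PROOFS =====

theorem egcd_gcd (oldr r oldx x : Int) (h0 : 0 ≤ oldr) (h1 : 0 ≤ r) :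
    (egcd oldr r oldx x).1 = Int.gcd oldr r := by
  induction oldr, r, oldx, x using egcd.induct with
  | case1 oldr oldx x =>
    rw [egcd]
    simp [Int.gcd, Int.natAbs_of_nonneg h0]
  | case2 oldr r oldx x h ih =>
    rw [egcd]; simp only [h, dite_false]
    have hr : 0 < r := lt_of_le_of_ne h1 (Ne.symm h)
    have hm : oldr - PySem.Int.floordiv oldr r * r = oldr % r := by
      have h2 := PySem.Int.floordiv_mul_add_mod oldr r
      have h3 := PySem.Int.mod_eq_emod_of_pos (a := oldr) hr
      omega
    have hnn : 0 ≤ oldr % r := Int.emod_nonneg oldr (by omega)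
    rw [ih h1 (by omega)]
    rw [hm]
    -- gcd r (oldr % r) = gcd oldr r, via Nat.gcd_rec on the natAbs values
    have hOr : (oldr % r).natAbs = oldr.natAbs % r.natAbs :=
      Int.natAbs_emod_of_nonneg h0 r
    rw [Int.gcd, Int.gcd, hOr, Nat.gcd_comm, ← Nat.gcd_rec, Nat.gcd_comm]

theorem egcd_bezout (a m : Int) (oldr r oldx x : Int)
    (h0 : oldr ≡ a * oldx [ZMOD m]) (h1 : r ≡ a * x [ZMOD m]) :
    (egcd oldr r oldx x).1 ≡ a * (egcd oldr r oldx x).2 [ZMOD m] := by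
  induction oldr, r, oldx, x using egcd.induct with
  | case1 oldr oldx x =>
    rw [egcd]; simpa using h0
  | case2 oldr r oldx x h ih =>
    rw [egcd]; simp only [h, dite_false]
    refine ih h1 ?_
    have := h0.sub (h1.mul_left (PySem.Int.floordiv oldr r))
    calc oldr - PySem.Int.floordiv oldr r * r
        ≡ a * oldx - PySem.Int.floordiv oldr r * (a * x) [ZMOD m] := this
      _ = a * (oldx - PySem.Int.floordiv oldr r * x) := by ring

theorem filter_eq_singleton_of_unique {l : List Int} {p : Int → Bool} (hnd : l.Nodup)
    (k : Int) (hk : k ∈ l) (hpk : p k = true) (hu : ∀ j ∈ l, p j = true → j = k) :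
    l.filter p = [k] := by
  induction l with
  | nil => cases hk
  | cons h t ih =>
    rcases List.nodup_cons.mp hnd with ⟨hht, hndt⟩
    by_cases hhk : h = k
    · subst hhk
      have ht0 : t.filter p = [] := by
        apply List.filter_eq_nil_iff.mpr
        intro j hj hpj
        exact hht ((hu j (List.mem_cons_of_mem h hj) hpj) ▸ hj)
      simp [hpk, ht0]
    · have hph : p h = false := by
        cases hp : p h with
        | false => rfl
        | true => exact absurd (hu h List.mem_cons_self hp) hhk
      have hkt : k ∈ t := by
        rcases List.mem_cons.mp hk with h1 | h1
        · exact absurd h1.symm hhk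
        · exact h1
      rw [List.filter_cons_of_neg (by simp [hph])]
      exact ih hndt hkt (fun j hj hpj => hu j (List.mem_cons_of_mem h hj) hpj)

theorem modeq_of_emod_eq {x y n : Int} (h : x % n = y % n) : x ≡ y [ZMOD n] := h

theorem main_eq (a0 b : Int) :
    (if ((PySem.List.pyRange 0 65535 1).filter
          (fun i => PySem.Int.mod (i * a0 + 1) 65535 == b)).length == 1 then
      some (PySem.Int.mod (PySem.List.pyGetD
        ((PySem.List.pyRange 0 65535 1).filter
          (fun i => PySem.Int.mod (i * a0 + 1) 65535 == b)) 0 0 * b + 1) 65535)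
    else none) =
    (if b < 0 ∨ (65535:Int) ≤ b then none
     else if (egcd (PySem.Int.mod a0 65535) 65535 1 0).1 ≠ 1 then none
     else some (PySem.Int.mod (PySem.Int.mod ((b - 1) * (egcd (PySem.Int.mod a0 65535) 65535 1 0).2) 65535 * b + 1) 65535)) := by
  have hmod : ∀ z : Int, PySem.Int.mod z 65535 = z % 65535 := fun z =>
    PySem.Int.mod_eq_emod_of_pos (by norm_num)
  by_cases hb : b < 0 ∨ (65535:Int) ≤ b
  · -- b out of [0,65535): no residue can match, both sides are none
    have hf : (PySem.List.pyRange 0 65535 1).filter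
        (fun i => PySem.Int.mod (i * a0 + 1) 65535 == b) = [] := by
      apply List.filter_eq_nil_iff.mpr
      intro i _
      simp only [hmod, beq_iff_eq]
      have h1 := Int.emod_nonneg (i * a0 + 1) (by norm_num : (65535:Int) ≠ 0)
      have h2 := Int.emod_lt_of_pos (i * a0 + 1) (by norm_num : (0:Int) < 65535)
      omega
    rw [hf, if_pos hb]
    norm_num
  · rw [not_or, not_lt, not_le] at hb
    conv_rhs => rw [if_neg (by omega : ¬(b < 0 ∨ (65535:Int) ≤ b))]
    set a : Int := PySem.Int.mod a0 65535 with haDef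
    have haE : a = a0 % 65535 := hmod a0
    have ha0 : 0 ≤ a := by rw [haE]; exact Int.emod_nonneg a0 (by norm_num)
    have haMod : a ≡ a0 [ZMOD 65535] := by
      apply modeq_of_emod_eq; rw [haE, Int.emod_emod_of_dvd a0 dvd_rfl]
    set x : Int := (egcd a 65535 1 0).2 with hxDef
    have bez : (egcd a 65535 1 0).1 ≡ a * x [ZMOD 65535] := by
      apply egcd_bezout a 65535 a 65535 1 0
      · apply modeq_of_emod_eq; ring_nf
      · apply modeq_of_emod_eq; norm_num
    by_cases hg : (egcd a 65535 1 0).1 = 1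
    · -- gcd = 1: exactly one matching residue i0, both sides return the same value
      conv_rhs => rw [if_neg (by simpa using hg)]
      have inv : a * x ≡ 1 [ZMOD 65535] := (hg ▸ bez).symm
      set i0 : Int := ((b - 1) * x) % 65535 with hi0Def
      have hi0nn : 0 ≤ i0 := Int.emod_nonneg _ (by norm_num)
      have hi0lt : i0 < 65535 := Int.emod_lt_of_pos _ (by norm_num)
      have hi0m : i0 ≡ (b - 1) * x [ZMOD 65535] := by
        apply modeq_of_emod_eq; rw [hi0Def, Int.emod_emod_of_dvd _ dvd_rfl]
      have hpi0 : ((i0 * a0 + 1) % 65535) = b := by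
        have step : i0 * a0 + 1 ≡ b [ZMOD 65535] := by
          calc i0 * a0 + 1 ≡ ((b - 1) * x) * a0 + 1 [ZMOD 65535] :=
              (hi0m.mul_right a0).add_right 1
            _ = (b - 1) * (a0 * x) + 1 := by ring
            _ ≡ (b - 1) * (a * x) + 1 [ZMOD 65535] :=
                ((Int.ModEq.refl (b - 1)).mul (haMod.symm.mul_right x)).add_right 1
            _ ≡ (b - 1) * 1 + 1 [ZMOD 65535] := ((Int.ModEq.refl _).mul inv).add_right 1
            _ = b := by ring
        have hdv := Int.ModEq.dvd step
        omega
      have huniq : ∀ j : Int, 0 ≤ j → j < 65535 → ((j * a0 + 1) % 65535) = b → j = i0 := by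
        intro j hj0 hj1 hpj
        have e2 : j * a0 ≡ i0 * a0 [ZMOD 65535] := by
          have e1 : (j * a0 + 1) % 65535 = (i0 * a0 + 1) % 65535 := by rw [hpj, hpi0]
          have := modeq_of_emod_eq e1
          have := this.sub_right 1
          simpa using this
        have e4 : j * a ≡ i0 * a [ZMOD 65535] :=
          (((Int.ModEq.refl j).mul haMod).trans e2).trans ((Int.ModEq.refl i0).mul haMod).symm
        have e3 : j ≡ i0 [ZMOD 65535] := by
          calc j = j * 1 := by ring
            _ ≡ j * (a * x) [ZMOD 65535] := (Int.ModEq.refl j).mul inv.symm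
            _ = (j * a) * x := by ring
            _ ≡ (i0 * a) * x [ZMOD 65535] := e4.mul_right x
            _ = i0 * (a * x) := by ring
            _ ≡ i0 * 1 [ZMOD 65535] := (Int.ModEq.refl i0).mul inv
            _ = i0 := by ring
        have hdv := Int.ModEq.dvd e3
        omega
      have hf : (PySem.List.pyRange 0 65535 1).filter
          (fun i => PySem.Int.mod (i * a0 + 1) 65535 == b) = [i0] := by
        apply filter_eq_singleton_of_unique (PySem.List.nodup_pyRange_one 0 65535)
        · exact PySem.List.mem_pyRange_one.mpr ⟨hi0nn, hi0lt⟩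
        · simp only [hmod, beq_iff_eq]; exact hpi0
        · intro j hj hpj
          rcases PySem.List.mem_pyRange_one.mp hj with ⟨hj0, hj1⟩
          simp only [hmod, beq_iff_eq] at hpj
          exact huniq j hj0 hj1 hpj
      rw [hf]
      have hmi : PySem.Int.mod ((b - 1) * x) 65535 = i0 := by rw [hmod, hi0Def]
      rw [hmi]
      simp
    · -- gcd ≠ 1: never exactly one matching residue, both sides are none
      conv_rhs => rw [if_pos (by simpa using hg)]
      have hgcd : (egcd a 65535 1 0).1 = Int.gcd a 65535 :=
        egcd_gcd a 65535 1 0 ha0 (by norm_num)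
      set d : ℕ := Int.gcd a 65535 with hdDef
      have hd1 : (d:Int) ≠ 1 := by rw [hgcd] at hg; exact_mod_cast hg
      have hdvdm : (d:Int) ∣ 65535 := Int.gcd_dvd_right a 65535
      have hdvda : (d:Int) ∣ a := Int.gcd_dvd_left a 65535
      have hd0 : 0 < (d:Int) := by
        have hne : d ≠ 0 := by
          intro h
          rw [hdDef] at h
          have := Int.eq_zero_of_gcd_eq_zero_right h
          norm_num at this
        exact_mod_cast Nat.pos_of_ne_zero hne
      have hd2 : 2 ≤ (d:Int) := by omega
      set t : Int := 65535 / (d:Int) with htDef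
      have htd : t * (d:Int) = 65535 := Int.ediv_mul_cancel hdvdm
      have ht0 : 0 < t := by
        rcases mul_pos_iff.mp (show (0:Int) < t * (d:Int) by omega) with ⟨h, _⟩ | ⟨_, h⟩
        · exact h
        · omega
      have htlt : t < 65535 := by
        have h2t : t * 2 ≤ t * (d:Int) := mul_le_mul_of_nonneg_left hd2 (le_of_lt ht0)
        omega
      have hta : (65535:Int) ∣ t * a0 := by
        rcases hdvda with ⟨a', ha'⟩
        have h2 : (65535:Int) ∣ t * a := ⟨a', by linear_combination t * ha' + a' * htd⟩
        have h3 : t * a0 ≡ t * a [ZMOD 65535] := (Int.ModEq.refl t).mul haMod.symm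
        have h4 : t * a ≡ 0 [ZMOD 65535] := Int.modEq_zero_iff_dvd.mpr h2
        exact Int.modEq_zero_iff_dvd.mp (h3.trans h4)
      suffices hne : ((PySem.List.pyRange 0 65535 1).filter
          (fun i => PySem.Int.mod (i * a0 + 1) 65535 == b)).length ≠ 1 by
        simp only [hmod] at hne
        simp [hne]
      intro hlen
      rcases List.length_eq_one_iff.mp hlen with ⟨y, hy⟩
      have hymem : y ∈ (PySem.List.pyRange 0 65535 1).filter
          (fun i => PySem.Int.mod (i * a0 + 1) 65535 == b) := by
        rw [hy]; exact List.mem_cons_self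
      rcases List.mem_filter.mp hymem with ⟨hyr, hpy⟩
      rcases PySem.List.mem_pyRange_one.mp hyr with ⟨hy0, hy1⟩
      simp only [hmod, beq_iff_eq] at hpy
      set j : Int := (y + t) % 65535 with hjDef
      have hj0 : 0 ≤ j := Int.emod_nonneg _ (by norm_num)
      have hj1 : j < 65535 := Int.emod_lt_of_pos _ (by norm_num)
      have hjm : j ≡ y + t [ZMOD 65535] := by
        apply modeq_of_emod_eq; rw [hjDef, Int.emod_emod_of_dvd _ dvd_rfl]
      have hpj : (j * a0 + 1) % 65535 = b := by
        have step : j * a0 + 1 ≡ y * a0 + 1 [ZMOD 65535] := by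
          calc j * a0 + 1 ≡ (y + t) * a0 + 1 [ZMOD 65535] := (hjm.mul_right a0).add_right 1
            _ = (y * a0 + 1) + t * a0 := by ring
            _ ≡ (y * a0 + 1) + 0 [ZMOD 65535] :=
                (Int.ModEq.refl _).add (Int.modEq_zero_iff_dvd.mpr hta)
            _ = y * a0 + 1 := by ring
        have hdv := Int.ModEq.dvd step
        omega
      have hjmem : j ∈ (PySem.List.pyRange 0 65535 1).filter
          (fun i => PySem.Int.mod (i * a0 + 1) 65535 == b) := by
        apply List.mem_filter.mpr
        refine ⟨PySem.List.mem_pyRange_one.mpr ⟨hj0, hj1⟩, ?_⟩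
        simp only [hmod, beq_iff_eq]; exact hpj
      rw [hy] at hjmem
      have hjy : j = y := by simpa using hjmem
      have hdvd := Int.ModEq.dvd hjm
      omega

-- ===== VERDICT (by name: the statement is the Claim_ definition above) =====
theorem random_spec : Claim_equal_random := by
  intro lst _ _
  show random lst = random_alt lst
  simp only [random, random_alt, PySem.List.foldl_append_if_eq_filter, List.nil_append]
  exact main_eq (PySem.List.pyGetD lst 0 0) (PySem.List.pyGetD lst 1 0)
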